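-- pv_equiv track=rewrite | github.com/RotemAmsalem/mini-projects | INTRO-ex5/crossword.py | l_direction
-- ===== SOURCE A (Python) =====
-- def concat_list(str_lst):
--     """ This function receives a list of strings, and return the
--     concatenation of the list's parts as one string."""
--     length = len(str_lst)  # the list can be an empty list.
--     one_str = ''
--     for i in range(length):
--         one_str = one_str + str_lst[i]
--     return one_str
--
-- def check_directions(lst1, lst2, words):
--     """ This function receives two lists. The first one is matrix list and the
--     second is an empty list which in the end will contain the words
--     according to each searching words direction."""
--     for j in range(len(words)):
--         for i in range(len(lst1)):
--             if words[j] in lst1[i]: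
--                 for p in range(len(lst1[i])-len(words[j])+1):
--                     check = lst1[i][p:p+len(words[j])]
--                     if check == words[j]:
--                         lst2.append(words[j])
--     return lst2
--
-- def l_direction(matrix_lst, words):
--     """ This function receives the matrix list and returns the words that are
--     found in the left direction."""
--     left_lst = []
--     word_left_lst = []
--     for i in range(len(matrix_lst)):
--         for j in range(len(matrix_lst[0])-1, -1, -1):
--             row = matrix_lst[i]
--             left_lst.append(row[j].lower())
--         left_lst.append(' ')
--     column_left_lst = str(concat_list(left_lst)).split()
--     return check_directions(column_left_lst, word_left_lst,words)
-- ===== SOURCE B (Python) =====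
-- def l_direction(matrix_lst, words):
--     """ This function receives the matrix list and returns the words that are
--     found in the left direction."""
--     if matrix_lst:
--         w = len(matrix_lst[0])
--         segments = [seg for row in matrix_lst
--                     for seg in row[:w][::-1].lower().split()]
--     else:
--         segments = []
--     # Substring index: count every substring (of the lengths that occur among
--     # the words) of every segment once; afterwards each word is one lookup.
--     lengths = set(len(word) for word in words)
--     counts = {}
--     for seg in segments:
--         for L in lengths:
--             for p in range(len(seg) - L + 1):
--                 key = seg[p:p+L]
--                 counts[key] = counts.get(key, 0) + 1
--     return [word for word in words for _ in range(counts.get(word, 0))]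
-- ===== Notes on version B (the rewrite author's own statement) =====
-- stated objective: faster
-- what changed: B replaces A's per-word sliding-window search entirely: it builds a substring index (a dict counting every substring of each needed length across all segments, computed once) and then answers each word with a single dict lookup, emitting count copies; A instead re-scans every segment for every word with slice comparisons at each position.
import Mathlib
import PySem

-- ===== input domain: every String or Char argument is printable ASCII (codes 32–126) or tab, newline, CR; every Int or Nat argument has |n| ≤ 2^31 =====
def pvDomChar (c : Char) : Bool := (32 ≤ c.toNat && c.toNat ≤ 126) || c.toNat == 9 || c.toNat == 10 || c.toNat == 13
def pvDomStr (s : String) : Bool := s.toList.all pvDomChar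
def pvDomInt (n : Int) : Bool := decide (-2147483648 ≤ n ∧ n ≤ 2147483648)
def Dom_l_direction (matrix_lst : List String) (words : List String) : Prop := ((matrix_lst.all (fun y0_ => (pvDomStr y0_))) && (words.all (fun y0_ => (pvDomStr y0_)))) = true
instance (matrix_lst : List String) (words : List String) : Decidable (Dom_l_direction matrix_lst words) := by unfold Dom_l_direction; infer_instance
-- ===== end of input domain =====

-- B replaces A's per-word sliding-window search with a substring index: it counts every
-- substring of the needed lengths across all segments once into a dict, then answers each
-- word by a single lookup (measured faster in a timing run).


-- ===== PORT A =====
def concatList (str_lst : List String) : String :=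
  let length := PySem.List.len str_lst
  (PySem.List.pyRange 0 length).foldl
    (fun one_str i => one_str ++ PySem.List.pyGetD str_lst i "") ""

def checkDirections (lst1 : List String) (lst2 : List String) (words : List String) : List String :=
  (PySem.List.pyRange 0 (PySem.List.len words)).foldl (fun lst2 j =>
    (PySem.List.pyRange 0 (PySem.List.len lst1)).foldl (fun lst2 i =>
      if PySem.Str.isIn (PySem.List.pyGetD words j "") (PySem.List.pyGetD lst1 i "") then
        (PySem.List.pyRange 0
            (PySem.Str.len (PySem.List.pyGetD lst1 i "") - PySem.Str.len (PySem.List.pyGetD words j "") + 1)).foldl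
          (fun lst2 p =>
            let check := PySem.Str.slice (PySem.List.pyGetD lst1 i "")
              (some p) (some (p + PySem.Str.len (PySem.List.pyGetD words j "")))
            if check == PySem.List.pyGetD words j "" then lst2 ++ [PySem.List.pyGetD words j ""] else lst2)
          lst2
      else lst2) lst2) lst2

def l_direction (matrix_lst : List String) (words : List String) : List String :=
  let left_lst : List String :=
    (PySem.List.pyRange 0 (PySem.List.len matrix_lst)).foldl (fun left_lst i =>
      ((PySem.List.pyRange (PySem.Str.len (PySem.List.pyGetD matrix_lst 0 "") - 1) (-1) (-1)).foldl
        (fun left_lst j =>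
          let row := PySem.List.pyGetD matrix_lst i ""
          -- row[j].lower(): a 1-char string (IndexError, i.e. none, is excluded by Pre_)
          left_lst ++ [PySem.Str.lower (((PySem.Str.pyGet? row j).map (fun c => String.ofList [c])).getD "")])
        left_lst) ++ [" "])
      []
  let column_left_lst := PySem.Str.split₀ (concatList left_lst)
  checkDirections column_left_lst [] words

-- ===== PORT B =====
def l_direction_alt (matrix_lst : List String) (words : List String) : List String :=
  let segments : List String :=
    match matrix_lst with
    | [] => []
    | r0 :: _ =>
      let w := PySem.Str.len r0
      matrix_lst.flatMap (fun row =>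
        PySem.Str.split₀ (PySem.Str.lower
          ((PySem.Str.slice? (PySem.Str.slice row none (some w)) none none (-1)).getD "")))
  -- lengths = set(len(word) for word in words); the dict built below is only looked up
  -- afterwards, so iterating the set is order-independent
  let lengths : PySem.Set Int := PySem.Set.ofList (words.map PySem.Str.len)
  let counts : PySem.Dict String Int :=
    segments.foldl (fun counts seg =>
      lengths.foldl (fun counts L =>
        (PySem.List.pyRange 0 (PySem.Str.len seg - L + 1)).foldl (fun counts p =>
          let key := PySem.Str.slice seg (some p) (some (p + L))
          counts.insert key (counts.getD key 0 + 1)) counts) counts) PySem.Dict.empty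
  words.flatMap (fun word =>
    (PySem.List.pyRange 0 (counts.getD word 0)).map (fun _ => word))

-- ===== PRECONDITION & SPEC =====
-- A indexes every row at positions 0 .. len(matrix_lst[0])-1, so it raises IndexError on any
-- row shorter than the first row; Pre_ excludes exactly those inputs.
def Pre_l_direction (matrix_lst : List String) (words : List String) : Prop :=
  ∀ r ∈ matrix_lst, (matrix_lst.headD "").toList.length ≤ r.toList.length
instance (matrix_lst : List String) (words : List String) : Decidable (Pre_l_direction matrix_lst words) := by unfold Pre_l_direction; infer_instance
def pvWitness_l_direction : List String × List String := (["ab", "cd"], ["a"])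

def Spec_l_direction (matrix_lst : List String) (words : List String) (out : List String) : Prop := out = l_direction_alt matrix_lst words
instance (matrix_lst : List String) (words : List String) (out : List String) : Decidable (Spec_l_direction matrix_lst words out) := by unfold Spec_l_direction; infer_instance

-- ===== CLAIM (what is proved, stated in full; the proofs are below) =====
def Claim_equal_l_direction : Prop := ∀ (matrix_lst : List String) (words : List String), Dom_l_direction matrix_lst words → Pre_l_direction matrix_lst words → Spec_l_direction matrix_lst words (l_direction matrix_lst words)

-- ===== LEMMAS AND PROOFS =====

-- number of (possibly overlapping) occurrence positions of w in s
def occCount (s w : String) : Nat :=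
  List.countP (fun p => decide (w.toList <+: s.toList.drop p)) (List.range (s.toList.length + 1))

-- the window test A performs at position k, as a prefix condition
lemma slice_beq (s w : String) (k : Nat) :
    (PySem.Str.slice s (some ((k : Nat) : Int)) (some (((k : Nat) : Int) + PySem.Str.len w)) == w)
      = decide (w.toList <+: s.toList.drop k) := by
  rw [Bool.eq_iff_iff, beq_iff_eq, decide_eq_true_eq, String.ext_iff,
    PySem.Str.toList_slice, PySem.Str.len_eq, PySem.Chars.slice_eq_listSlice,
    PySem.List.slice_natCast_add, List.prefix_iff_eq_take]
  exact eq_comm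

-- counting matches over A's window range counts all occurrence positions
lemma countP_range_occ (s w : String) (hML : w.toList.length ≤ s.toList.length) :
    List.countP (fun p => decide (w.toList <+: s.toList.drop p))
        (List.range (s.toList.length - w.toList.length + 1)) = occCount s w := by
  have h2 : List.countP (fun p => decide (w.toList <+: s.toList.drop p))
      ((List.range w.toList.length).map (fun x => s.toList.length - w.toList.length + 1 + x)) = 0 := by
    rw [List.countP_eq_zero]
    intro a ha
    simp only [List.mem_map, List.mem_range] at ha
    obtain ⟨x, hx, rfl⟩ := ha
    simp only [decide_eq_true_eq]
    intro hpre
    have := hpre.length_le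
    rw [List.length_drop] at this
    omega
  unfold occCount
  conv_rhs => rw [show s.toList.length + 1
      = (s.toList.length - w.toList.length + 1) + w.toList.length by omega, List.range_add]
  rw [List.countP_append, h2]
  omega

lemma occ_if (s w : String) (acc : List String) :
    (if PySem.Str.isIn w s then
      (PySem.List.pyRange 0 (PySem.Str.len s - PySem.Str.len w + 1)).foldl
        (fun acc p =>
          if PySem.Str.slice s (some p) (some (p + PySem.Str.len w)) == w then acc ++ [w] else acc)
        acc
     else acc) = acc ++ List.replicate (occCount s w) w := by
  by_cases hin : PySem.Str.isIn w s
  · rw [if_pos hin]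
    have hML : w.toList.length ≤ s.toList.length :=
      ((PySem.Str.isIn_iff_infix w s).mp hin).length_le
    have hcast : PySem.Str.len s - PySem.Str.len w + 1
        = ((s.toList.length - w.toList.length + 1 : Nat) : Int) := by
      rw [PySem.Str.len_eq, PySem.Str.len_eq]; omega
    rw [hcast, PySem.List.pyRange_zero_natCast, List.foldl_map]
    simp only [slice_beq]
    rw [PySem.List.foldl_append_if (fun k => decide (w.toList <+: s.toList.drop k)) (fun _ => w),
      List.map_const', ← List.countP_eq_length_filter, countP_range_occ s w hML]
  · rw [if_neg hin]
    have h0 : occCount s w = 0 := by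
      unfold occCount
      rw [List.countP_eq_zero]
      intro a _
      simp only [decide_eq_true_eq]
      intro hpre
      exact hin ((PySem.Str.isIn_iff_infix w s).mpr
        (hpre.isInfix.trans (List.drop_suffix _ _).isInfix))
    simp [h0]

lemma split_go_acc (s : List Char) : ∀ (cur : List Char) (acc : List (List Char)),
    PySem.Chars.split₀.go s cur acc = acc.reverse ++ PySem.Chars.split₀.go s cur [] := by
  induction s with
  | nil =>
    intro cur acc
    simp only [PySem.Chars.split₀.go]
    by_cases h : cur.isEmpty <;> simp [h]
  | cons c rest ih =>
    intro cur acc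
    simp only [PySem.Chars.split₀.go]
    by_cases h : PySem.Chars.isspace c
    · by_cases h2 : cur.isEmpty <;> simp only [h, h2, if_true, if_false, Bool.false_eq_true]
      · exact ih [] acc
      · rw [ih [] (cur.reverse :: acc), ih [] [cur.reverse]]
        simp
    · simp only [h, Bool.false_eq_true, if_false]
      exact ih (c :: cur) acc

lemma split_go_space (b : List Char) : ∀ (a cur : List Char),
    PySem.Chars.split₀.go (a ++ ' ' :: b) cur [] =
      PySem.Chars.split₀.go a cur [] ++ PySem.Chars.split₀.go b [] [] := by
  intro a
  induction a with
  | nil =>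
    intro cur
    simp only [List.nil_append, PySem.Chars.split₀.go]
    have hsp : PySem.Chars.isspace ' ' = true := by decide
    rw [hsp]
    by_cases h2 : cur.isEmpty
    · simp only [h2, if_true]
      simp
    · simp only [h2, Bool.false_eq_true, if_false]
      rw [split_go_acc b [] [cur.reverse]]
      simp
  | cons c rest ih =>
    intro cur
    simp only [List.cons_append, PySem.Chars.split₀.go]
    by_cases h : PySem.Chars.isspace c
    · by_cases h2 : cur.isEmpty <;>
        simp only [h, h2, if_true, if_false, Bool.false_eq_true]
      · exact ih []
      · rw [split_go_acc (rest ++ ' ' :: b) [] (cur.reverse :: [])]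
        rw [split_go_acc rest [] (cur.reverse :: [])]
        simp [ih []]
    · simp only [h, Bool.false_eq_true, if_false]
      exact ih (c :: cur)

lemma split₀_append_space (a b : List Char) :
    PySem.Chars.split₀ (a ++ ' ' :: b) = PySem.Chars.split₀ a ++ PySem.Chars.split₀ b := by
  simp only [PySem.Chars.split₀]
  exact split_go_space b a []

lemma split₀_flatten : ∀ (rows : List (List Char)),
    PySem.Chars.split₀ ((rows.map (fun r => r ++ [' '])).flatten)
      = rows.flatMap PySem.Chars.split₀ := by
  intro rows
  induction rows with
  | nil => decide
  | cons r rest ih =>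
    simp only [List.map_cons, List.flatten_cons, List.flatMap_cons, List.append_assoc,
      List.singleton_append]
    rw [split₀_append_space, ih]

-- canonical double loop A's search reduces to
def canonLoop (segs words : List String) : List String :=
  words.foldl (fun acc w =>
    segs.foldl (fun acc s => acc ++ List.replicate (occCount s w) w) acc) []

lemma checkDirections_canon (segs words : List String) :
    checkDirections segs [] words = canonLoop segs words := by
  have houter :
      checkDirections segs [] words
        = words.foldl (fun lst2 wj =>
            (PySem.List.pyRange 0 (PySem.List.len segs)).foldl (fun lst2 i =>
              if PySem.Str.isIn wj (PySem.List.pyGetD segs i "") then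
                (PySem.List.pyRange 0
                    (PySem.Str.len (PySem.List.pyGetD segs i "") - PySem.Str.len wj + 1)).foldl
                  (fun lst2 p =>
                    if PySem.Str.slice (PySem.List.pyGetD segs i "")
                        (some p) (some (p + PySem.Str.len wj)) == wj then lst2 ++ [wj] else lst2)
                  lst2
              else lst2) lst2) [] :=
    PySem.List.foldl_pyRange_pyGetD words ""
      (fun lst2 wj =>
        (PySem.List.pyRange 0 (PySem.List.len segs)).foldl (fun lst2 i =>
          if PySem.Str.isIn wj (PySem.List.pyGetD segs i "") then
            (PySem.List.pyRange 0
                (PySem.Str.len (PySem.List.pyGetD segs i "") - PySem.Str.len wj + 1)).foldl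
              (fun lst2 p =>
                if PySem.Str.slice (PySem.List.pyGetD segs i "")
                    (some p) (some (p + PySem.Str.len wj)) == wj then lst2 ++ [wj] else lst2)
              lst2
          else lst2) lst2) [] (le_refl 0)
  rw [houter]
  apply PySem.List.foldl_congr_mem
  intro acc wj _
  have hinner :
      (PySem.List.pyRange 0 (PySem.List.len segs)).foldl (fun lst2 i =>
          if PySem.Str.isIn wj (PySem.List.pyGetD segs i "") then
            (PySem.List.pyRange 0
                (PySem.Str.len (PySem.List.pyGetD segs i "") - PySem.Str.len wj + 1)).foldl
              (fun lst2 p =>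
                if PySem.Str.slice (PySem.List.pyGetD segs i "")
                    (some p) (some (p + PySem.Str.len wj)) == wj then lst2 ++ [wj] else lst2)
              lst2
          else lst2) acc
        = segs.foldl (fun lst2 s =>
            if PySem.Str.isIn wj s then
              (PySem.List.pyRange 0 (PySem.Str.len s - PySem.Str.len wj + 1)).foldl
                (fun lst2 p =>
                  if PySem.Str.slice s (some p) (some (p + PySem.Str.len wj)) == wj
                  then lst2 ++ [wj] else lst2)
                lst2
            else lst2) acc :=
    PySem.List.foldl_pyRange_pyGetD segs ""
      (fun lst2 s =>
        if PySem.Str.isIn wj s then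
          (PySem.List.pyRange 0 (PySem.Str.len s - PySem.Str.len wj + 1)).foldl
            (fun lst2 p =>
              if PySem.Str.slice s (some p) (some (p + PySem.Str.len wj)) == wj
              then lst2 ++ [wj] else lst2)
            lst2
        else lst2) acc (le_refl 0)
  rw [hinner]
  apply PySem.List.foldl_congr_mem
  intro acc2 s _
  exact occ_if s wj acc2

-- per-word hit list over the segments
def hitsFor (segs : List String) (w : String) : List String :=
  segs.flatMap (fun s => List.replicate (occCount s w) w)

lemma canonLoop_eq (segs words : List String) :
    canonLoop segs words = words.flatMap (hitsFor segs) := by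
  unfold canonLoop hitsFor
  simp only [PySem.List.foldl_append_eq_flatMap]
  simp

-- ---- B-side: the substring counter ----

-- the keys B inserts for one segment and one length
def keysSeg (s : String) (L : Int) : List String :=
  (PySem.List.pyRange 0 (PySem.Str.len s - L + 1)).map
    (fun p => PySem.Str.slice s (some p) (some (p + L)))

def incKeys (keys : List String) (d : PySem.Dict String Int) : PySem.Dict String Int :=
  keys.foldl (fun d k => d.insert k (d.getD k 0 + 1)) d

lemma getD_incKeys (keys : List String) (d : PySem.Dict String Int) (w : String) :
    (incKeys keys d).getD w 0 = d.getD w 0 + keys.count w :=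
  PySem.Dict.getD_foldl_insert_add_one keys d w

lemma incKeys_append (a b : List String) (d : PySem.Dict String Int) :
    incKeys (a ++ b) d = incKeys b (incKeys a d) := by
  unfold incKeys
  rw [List.foldl_append]

lemma foldl_incKeys_flatMap {α : Type} (f : α → List String) :
    ∀ (l : List α) (d : PySem.Dict String Int),
    l.foldl (fun d x => incKeys (f x) d) d = incKeys (l.flatMap f) d := by
  intro l
  induction l with
  | nil => intro d; simp [incKeys]
  | cons x xs ih =>
    intro d
    rw [List.foldl_cons, List.flatMap_cons, incKeys_append, ih]

lemma count_keysSeg_ne (s w : String) (L : Int) (hL : 0 ≤ L) (hne : L ≠ PySem.Str.len w) :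
    (keysSeg s L).count w = 0 := by
  rw [List.count_eq_zero]
  intro hmem
  unfold keysSeg at hmem
  rw [List.mem_map] at hmem
  obtain ⟨p, hp, heq⟩ := hmem
  by_cases hb : PySem.Str.len s - L + 1 ≤ 0
  · rw [PySem.List.pyRange_one_eq_nil hb] at hp
    simp at hp
  · rw [not_le] at hb
    have hcast : PySem.Str.len s - L + 1 = ((s.toList.length - L.toNat + 1 : Nat) : Int) := by
      rw [PySem.Str.len_eq] at hb ⊢; omega
    rw [hcast, PySem.List.pyRange_zero_natCast, List.mem_map] at hp
    obtain ⟨k, hk, rfl⟩ := hp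
    rw [List.mem_range] at hk
    have hLlen : L.toNat ≤ s.toList.length := by
      rw [PySem.Str.len_eq] at hb; omega
    have hlen : w.toList.length = L.toNat := by
      have := congrArg (fun t => t.toList.length) heq
      simp only [PySem.Str.toList_slice, PySem.Chars.slice_eq_listSlice] at this
      rw [show ((k : Nat) : Int) + L = ((k : Nat) : Int) + ((L.toNat : Nat) : Int) by omega,
        PySem.List.slice_natCast_add, List.length_take, List.length_drop] at this
      omega
    rw [PySem.Str.len_eq] at hne
    omega

lemma count_keysSeg_eq (s w : String) :
    (keysSeg s (PySem.Str.len w)).count w = occCount s w := by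
  unfold keysSeg
  by_cases hML : w.toList.length ≤ s.toList.length
  · have hcast : PySem.Str.len s - PySem.Str.len w + 1
        = ((s.toList.length - w.toList.length + 1 : Nat) : Int) := by
      rw [PySem.Str.len_eq, PySem.Str.len_eq]; omega
    rw [hcast, PySem.List.pyRange_zero_natCast, List.map_map, List.count, List.countP_map]
    rw [← countP_range_occ s w hML]
    apply List.countP_congr
    intro k _
    simp only [Function.comp_apply]
    rw [slice_beq]
  · rw [not_le] at hML
    have hb : PySem.Str.len s - PySem.Str.len w + 1 ≤ 0 := by
      rw [PySem.Str.len_eq, PySem.Str.len_eq]; omega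
    have h0 : occCount s w = 0 := by
      unfold occCount
      rw [List.countP_eq_zero]
      intro a _
      simp only [decide_eq_true_eq]
      intro hpre
      have := hpre.length_le
      rw [List.length_drop] at this
      omega
    rw [PySem.List.pyRange_one_eq_nil hb, h0]
    simp

lemma count_lengths_flatMap (s w : String) : ∀ (lengths : List Int),
    lengths.Nodup → (∀ L ∈ lengths, 0 ≤ L) → PySem.Str.len w ∈ lengths →
    ((lengths.flatMap (keysSeg s)).count w : Int) = (occCount s w : Int) := by
  intro lengths
  induction lengths with
  | nil => intro _ _ hmem; simp at hmem
  | cons L rest ih =>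
    intro hnd hpos hmem
    rw [List.flatMap_cons, List.count_append]
    by_cases hL : L = PySem.Str.len w
    · subst hL
      have hrest : (rest.flatMap (keysSeg s)).count w = 0 := by
        rw [List.count_eq_zero]
        intro hm
        rw [List.mem_flatMap] at hm
        obtain ⟨L', hL', hmw⟩ := hm
        have hne : L' ≠ PySem.Str.len w := by
          intro h; subst h
          exact (List.nodup_cons.mp hnd).1 hL'
        have : (keysSeg s L').count w = 0 :=
          count_keysSeg_ne s w L' (hpos L' (List.mem_cons_of_mem _ hL')) hne
        rw [List.count_eq_zero] at this
        exact this hmw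
      rw [hrest, count_keysSeg_eq]
      simp
    · have hhead : (keysSeg s L).count w = 0 :=
        count_keysSeg_ne s w L (hpos L (List.mem_cons_self)) hL
      rw [hhead]
      have hmem' : PySem.Str.len w ∈ rest := by
        cases List.mem_cons.mp hmem with
        | inl h => exact absurd h.symm hL
        | inr h => exact h
      rw [Nat.zero_add]
      exact ih (List.nodup_cons.mp hnd).2 (fun L' h => hpos L' (List.mem_cons_of_mem _ h)) hmem'

-- the counter's value at a word = total occurrence count over all segments
lemma counts_getD (segs : List String) (lengths : List Int) (w : String)
    (hnd : lengths.Nodup) (hpos : ∀ L ∈ lengths, 0 ≤ L) (hmem : PySem.Str.len w ∈ lengths) :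
    (segs.foldl (fun counts seg =>
        lengths.foldl (fun counts L =>
          (PySem.List.pyRange 0 (PySem.Str.len seg - L + 1)).foldl (fun counts p =>
            let key := PySem.Str.slice seg (some p) (some (p + L))
            counts.insert key (counts.getD key 0 + 1)) counts) counts) PySem.Dict.empty).getD w 0
      = ((segs.map (fun s => occCount s w)).sum : Int) := by
  have hinner : ∀ (seg : String) (d : PySem.Dict String Int),
      lengths.foldl (fun counts L =>
          (PySem.List.pyRange 0 (PySem.Str.len seg - L + 1)).foldl (fun counts p =>
            let key := PySem.Str.slice seg (some p) (some (p + L))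
            counts.insert key (counts.getD key 0 + 1)) counts) d
        = incKeys (lengths.flatMap (keysSeg seg)) d := by
    intro seg d
    rw [← foldl_incKeys_flatMap (keysSeg seg) lengths d]
    apply PySem.List.foldl_congr_mem
    intro d' L _
    unfold incKeys keysSeg
    rw [List.foldl_map]
  have h1 : segs.foldl (fun counts seg =>
        lengths.foldl (fun counts L =>
          (PySem.List.pyRange 0 (PySem.Str.len seg - L + 1)).foldl (fun counts p =>
            let key := PySem.Str.slice seg (some p) (some (p + L))
            counts.insert key (counts.getD key 0 + 1)) counts) counts) PySem.Dict.empty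
      = incKeys (segs.flatMap (fun seg => lengths.flatMap (keysSeg seg))) PySem.Dict.empty := by
    rw [← foldl_incKeys_flatMap (fun seg => lengths.flatMap (keysSeg seg)) segs PySem.Dict.empty]
    apply PySem.List.foldl_congr_mem
    intro d seg _
    exact hinner seg d
  rw [h1, getD_incKeys, PySem.Dict.getD_empty]
  have hcount : ∀ (ss : List String),
      ((ss.flatMap (fun seg => lengths.flatMap (keysSeg seg))).count w : Int)
        = ((ss.map (fun s => occCount s w)).sum : Int) := by
    intro ss
    induction ss with
    | nil => simp
    | cons s rest ih =>
      rw [List.flatMap_cons, List.count_append, List.map_cons, List.sum_cons]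
      push_cast
      rw [count_lengths_flatMap s w lengths hnd hpos hmem, ih]
      push_cast
      ring
  rw [hcount]
  simp

lemma replicate_sum (w : String) : ∀ (segs : List String),
    hitsFor segs w = List.replicate ((segs.map (fun s => occCount s w)).sum) w := by
  intro segs
  induction segs with
  | nil => simp [hitsFor]
  | cons s rest ih =>
    unfold hitsFor at ih ⊢
    rw [List.flatMap_cons, List.map_cons, List.sum_cons, ih, List.replicate_add]

lemma flatMap_congr_mem {α β : Type} (l : List α) (f g : α → List β)
    (h : ∀ x ∈ l, f x = g x) : l.flatMap f = l.flatMap g := by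
  induction l with
  | nil => rfl
  | cons x xs ih =>
    rw [List.flatMap_cons, List.flatMap_cons, h x List.mem_cons_self,
      ih (fun y hy => h y (List.mem_cons_of_mem _ hy))]

-- B's output equals the per-word hit lists, for ANY segment list
lemma alt_output (segs words : List String) :
    words.flatMap (fun word =>
      (PySem.List.pyRange 0
        ((segs.foldl (fun counts seg =>
            (PySem.Set.ofList (words.map PySem.Str.len)).foldl (fun counts L =>
              (PySem.List.pyRange 0 (PySem.Str.len seg - L + 1)).foldl (fun counts p =>
                let key := PySem.Str.slice seg (some p) (some (p + L))
                counts.insert key (counts.getD key 0 + 1)) counts) counts) PySem.Dict.empty).getD word 0)).map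
        (fun _ => word))
      = words.flatMap (hitsFor segs) := by
  apply flatMap_congr_mem
  intro word hword
  have hnd : (PySem.Set.ofList (words.map PySem.Str.len)).Nodup :=
    PySem.Set.nodup_ofList _
  have hpos : ∀ L ∈ PySem.Set.ofList (words.map PySem.Str.len), 0 ≤ L := by
    intro L hL
    rw [PySem.Set.mem_ofList] at hL
    rw [List.mem_map] at hL
    obtain ⟨w', _, rfl⟩ := hL
    rw [PySem.Str.len_eq]
    omega
  have hmem : PySem.Str.len word ∈ PySem.Set.ofList (words.map PySem.Str.len) := by
    rw [PySem.Set.mem_ofList]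
    exact List.mem_map_of_mem hword
  rw [counts_getD segs (PySem.Set.ofList (words.map PySem.Str.len)) word hnd hpos hmem]
  rw [PySem.List.pyRange_zero_natCast, List.map_map, replicate_sum]
  rw [show ((fun _ => word) ∘ (fun (k : Nat) => (k : Int))) = (fun (_ : Nat) => word) from rfl,
    List.map_const', List.length_range]

-- B's port, reduced to the per-word hit lists over its segment list
lemma alt_counts (matrix_lst words : List String) :
    l_direction_alt matrix_lst words
      = words.flatMap (hitsFor (match matrix_lst with
        | [] => []
        | r0 :: _ =>
          matrix_lst.flatMap (fun row =>
            PySem.Str.split₀ (PySem.Str.lower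
              ((PySem.Str.slice? (PySem.Str.slice row none (some (PySem.Str.len r0)))
                none none (-1)).getD ""))))) := by
  have h := alt_output (match matrix_lst with
      | [] => []
      | r0 :: _ =>
        matrix_lst.flatMap (fun row =>
          PySem.Str.split₀ (PySem.Str.lower
            ((PySem.Str.slice? (PySem.Str.slice row none (some (PySem.Str.len r0)))
              none none (-1)).getD ""))))
    words
  simpa [l_direction_alt] using h

-- reversed-and-lowered prefix of a row, as A builds it character by character
def blockChars (width : Nat) (row : String) : List Char :=
  (row.toList.take width).reverse.map PySem.Chars.lowerChar

def rowBlock (width : Nat) (row : String) : List String :=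
  (row.toList.take width).reverse.map (fun c => PySem.Str.lower (String.ofList [c]))

lemma row_map (cs : List Char) (width : Nat) (h : width ≤ cs.length) (f : Option Char → String) :
    (List.range width).map (fun k => f cs[width - 1 - k]?)
      = (cs.take width).reverse.map (fun c => f (some c)) := by
  apply List.ext_getElem
  · simp [h]
  · intro i h1 h2
    have hi : i < width := by simpa using h1
    have hlen : (cs.take width).length = width := by simp [h]
    simp only [List.getElem_map, List.getElem_range]
    congr 1
    rw [List.getElem_reverse, List.getElem_take]
    rw [List.getElem?_eq_getElem (by omega)]
    congr 2
    omega

lemma foldl_append_toList : ∀ (l : List String) (s : String),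
    (l.foldl (· ++ ·) s).toList = s.toList ++ (l.map String.toList).flatten := by
  intro l
  induction l with
  | nil => simp
  | cons x xs ih =>
    intro s
    simp only [List.foldl_cons, ih, List.map_cons, List.flatten_cons]
    simp [List.append_assoc]

lemma flatten_rows (width : Nat) : ∀ (m : List String),
    ((m.flatMap (fun r => rowBlock width r ++ [" "])).map String.toList).flatten
      = (m.map (fun r => blockChars width r ++ [' '])).flatten := by
  intro m
  induction m with
  | nil => simp
  | cons r rest ih =>
    have hrow : ((rowBlock width r).map String.toList).flatten = blockChars width r := by
      unfold rowBlock blockChars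
      rw [List.map_map]
      have hfun : (String.toList ∘ fun c => PySem.Str.lower (String.ofList [c]))
          = fun c => [PySem.Chars.lowerChar c] := by
        funext c
        simp [PySem.Str.toList_lower, PySem.Chars.lower]
      rw [hfun, ← List.flatMap_def, ← List.map_eq_flatMap]
    simp only [List.flatMap_cons, List.map_cons, List.map_append, List.flatten_append,
      List.flatten_cons, ih]
    simp [hrow]

-- B's per-row segment string
def strB (r0 row : String) : String :=
  PySem.Str.lower
    ((PySem.Str.slice? (PySem.Str.slice row none (some (PySem.Str.len r0))) none none (-1)).getD "")

lemma strB_toList (r0 row : String) :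
    (strB r0 row).toList = blockChars r0.toList.length row := by
  unfold strB blockChars
  have hb : (0 : Int) ≤ PySem.Str.len r0 := by rw [PySem.Str.len_eq]; omega
  rw [PySem.Str.slice?_none_none_neg_one, Option.getD_some, PySem.Str.toList_lower,
    String.toList_ofList, PySem.Str.toList_slice, PySem.Chars.slice_eq_listSlice,
    PySem.List.slice_to row.toList hb]
  rw [show (PySem.Str.len r0).toNat = r0.toList.length by rw [PySem.Str.len_eq]; omega]
  simp [PySem.Chars.lower]

lemma segs_eq (r0 : String) (rest : List String)
    (hw : ∀ r ∈ (r0 :: rest), r0.toList.length ≤ r.toList.length) :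
    PySem.Str.split₀ (concatList
      ((PySem.List.pyRange 0 (PySem.List.len (r0 :: rest))).foldl (fun left_lst i =>
        ((PySem.List.pyRange
            (PySem.Str.len (PySem.List.pyGetD (r0 :: rest) 0 "") - 1) (-1) (-1)).foldl
          (fun left_lst j =>
            left_lst ++ [PySem.Str.lower
              (((PySem.Str.pyGet? (PySem.List.pyGetD (r0 :: rest) i "") j).map
                  (fun c => String.ofList [c])).getD "")])
          left_lst) ++ [" "])
        []))
      = (r0 :: rest).flatMap (fun row => PySem.Str.split₀ (strB r0 row)) := by
  set m : List String := r0 :: rest with hm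
  set width : Nat := r0.toList.length with hwidth
  have h1 : (PySem.List.pyRange 0 (PySem.List.len m)).foldl (fun left_lst i =>
        ((PySem.List.pyRange
            (PySem.Str.len (PySem.List.pyGetD m 0 "") - 1) (-1) (-1)).foldl
          (fun left_lst j =>
            left_lst ++ [PySem.Str.lower
              (((PySem.Str.pyGet? (PySem.List.pyGetD m i "") j).map
                  (fun c => String.ofList [c])).getD "")])
          left_lst) ++ [" "])
        []
      = m.foldl (fun left_lst row =>
        ((PySem.List.pyRange
            (PySem.Str.len (PySem.List.pyGetD m 0 "") - 1) (-1) (-1)).foldl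
          (fun left_lst j =>
            left_lst ++ [PySem.Str.lower
              (((PySem.Str.pyGet? row j).map (fun c => String.ofList [c])).getD "")])
          left_lst) ++ [" "])
        [] :=
    PySem.List.foldl_pyRange_pyGetD m ""
      (fun left_lst row =>
        ((PySem.List.pyRange
            (PySem.Str.len (PySem.List.pyGetD m 0 "") - 1) (-1) (-1)).foldl
          (fun left_lst j =>
            left_lst ++ [PySem.Str.lower
              (((PySem.Str.pyGet? row j).map (fun c => String.ofList [c])).getD "")])
          left_lst) ++ [" "]) [] (le_refl 0)
  rw [h1]
  have h0 : PySem.List.pyGetD m 0 "" = r0 := by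
    rw [hm]
    simp [PySem.List.pyGetD_ofNat']
  have h2 : m.foldl (fun left_lst row =>
        ((PySem.List.pyRange
            (PySem.Str.len (PySem.List.pyGetD m 0 "") - 1) (-1) (-1)).foldl
          (fun left_lst j =>
            left_lst ++ [PySem.Str.lower
              (((PySem.Str.pyGet? row j).map (fun c => String.ofList [c])).getD "")])
          left_lst) ++ [" "])
        []
      = m.foldl (fun left_lst row => left_lst ++ (rowBlock width row ++ [" "])) [] := by
    apply PySem.List.foldl_congr_mem
    intro acc row hrow
    have hwr : width ≤ row.toList.length := hw row hrow
    rw [h0, PySem.Str.len_eq, show ((r0.toList.length : Int) - 1) = ((width : Int) - 1) by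
      rw [hwidth]]
    rw [PySem.List.pyRange_neg_one,
      show (((width : Int) - 1) - (-1)).toNat = width by omega, List.foldl_map,
      PySem.List.foldl_append_singleton_eq_map]
    rw [List.append_assoc]
    congr 1
    have hcast : ∀ k ∈ List.range width,
        PySem.Str.lower (((PySem.Str.pyGet? row ((width : Int) - 1 - (k : Nat))).map
            (fun c => String.ofList [c])).getD "")
          = PySem.Str.lower (((row.toList[width - 1 - k]?).map
            (fun c => String.ofList [c])).getD "") := by
      intro k hk
      rw [List.mem_range] at hk
      rw [show ((width : Int) - 1 - (k : Nat)) = ((width - 1 - k : Nat) : Int) by omega,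
        PySem.Str.pyGet?_natCast]
    rw [List.map_congr_left hcast,
      row_map row.toList width hwr
        (fun o => PySem.Str.lower ((o.map (fun c => String.ofList [c])).getD ""))]
    unfold rowBlock
    simp
  rw [h2, PySem.List.foldl_append_eq_flatMap, List.nil_append]
  apply List.map_injective_iff.mpr (fun _ _ => String.toList_injective)
  rw [PySem.Str.split₀_map_toList]
  have h4 : concatList (m.flatMap (fun row => rowBlock width row ++ [" "]))
      = (m.flatMap (fun row => rowBlock width row ++ [" "])).foldl (· ++ ·) "" :=
    PySem.List.foldl_pyRange_pyGetD _ "" (· ++ ·) "" (le_refl 0)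
  rw [h4, foldl_append_toList, flatten_rows width m]
  rw [show (m.map (fun r => blockChars width r ++ [' ']))
      = ((m.map (blockChars width)).map (fun r => r ++ [' '])) by rw [List.map_map]; rfl]
  rw [show ("".toList : List Char) = [] from rfl, List.nil_append, split₀_flatten]
  rw [List.map_flatMap]
  simp only [PySem.Str.split₀_map_toList, strB_toList]
  simp [List.flatMap_def, List.map_map, hwidth]
  rfl


-- ===== VERDICT (by name: the statement is the Claim_ definition above) =====
set_option maxHeartbeats 1000000 in
theorem l_direction_spec : Claim_equal_l_direction := by
  intro matrix_lst words _ hpre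
  unfold Spec_l_direction
  rw [alt_counts]
  simp only [l_direction]
  rw [checkDirections_canon, canonLoop_eq]
  congr 2
  cases matrix_lst with
  | nil => decide
  | cons r0 rest =>
    exact segs_eq r0 rest (by
      intro r hr
      have := hpre r hr
      simpa using this)
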